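-- pv_equiv track=rewrite | github.com/MSFT-Codeforces/Junk_beacon_rank_ledger | misc/test_case_validator.py | validate_cases_with_T
-- ===== SOURCE A (Python) =====
-- class DSU:
--     __slots__ = ("p", "sz", "cc")
--     def __init__(self, n: int):
--         self.p = list(range(n))
--         self.sz = [1] * n
--         self.cc = n
--
--     def find(self, a: int) -> int:
--         p = self.p
--         while p[a] != a:
--             p[a] = p[p[a]]
--             a = p[a]
--         return a
--
--     def union(self, a: int, b: int) -> None:
--         ra = self.find(a)
--         rb = self.find(b)
--         if ra == rb:
--             return
--         if self.sz[ra] < self.sz[rb]: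
--             ra, rb = rb, ra
--         self.p[rb] = ra
--         self.sz[ra] += self.sz[rb]
--         self.cc -= 1
--
-- def parse_one_case(lines, idx):
--     # returns (ok, new_idx)
--     if idx >= len(lines):
--         return (False, idx)
--
--     parts = lines[idx].split(" ")
--     if len(parts) != 2:
--         return (False, idx)
--     try:
--         n = int(parts[0]); m = int(parts[1])
--     except:
--         return (False, idx)
--
--     # constraints
--     if not (2 <= n <= 2 * 10**5):
--         return (False, idx)
--     if not (n - 1 <= m <= 2 * 10**5):
--         return (False, idx)
--
--     # Need lines idx+1 ... idx+m
--     if idx + m >= len(lines):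
--         return (False, idx)
--
--     dsu = DSU(n)
--
--     for j in range(1, m + 1):
--         parts = lines[idx + j].split(" ")
--         if len(parts) != 3:
--             return (False, idx)
--         try:
--             u = int(parts[0]); v = int(parts[1]); w = int(parts[2])
--         except:
--             return (False, idx)
--
--         if not (1 <= u <= n and 1 <= v <= n):
--             return (False, idx)
--         if not (-10**9 <= w <= 10**9):
--             return (False, idx)
--
--         # connectedness considers undirected adjacency; self-loops don't help but are allowed.
--         if u != v:
--             dsu.union(u - 1, v - 1)
--
--     # graph must be connected (undirected)
--     if dsu.cc != 1:
--         return (False, idx)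
--
--     return (True, idx + 1 + m)
--
-- def validate_cases_with_T(lines):
--     if not lines:
--         return False
--     parts = lines[0].split(" ")
--     if len(parts) != 1:
--         return False
--     try:
--         T = int(parts[0])
--     except:
--         return False
--     if T < 1:
--         return False
--
--     idx = 1
--     for _ in range(T):
--         ok, idx2 = parse_one_case(lines, idx)
--         if not ok:
--             return False
--         idx = idx2
--     return idx == len(lines)
-- ===== SOURCE B (Python) =====
-- def validate_cases_with_T(lines):
--     # Connectivity by naive component relabelling (no union-find): each node keeps a
--     # component label; merging rewrites one label into the other and counts merges.
--     def ints(s, k):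
--         parts = s.split(" ")
--         if len(parts) != k:
--             return None
--         try:
--             return [int(p) for p in parts]
--         except ValueError:
--             return None
--
--     total = len(lines)
--     head = ints(lines[0], 1) if lines else None
--     if head is None or head[0] < 1:
--         return False
--     idx = 1
--     for _ in range(head[0]):
--         nm = ints(lines[idx], 2) if idx < total else None
--         if nm is None:
--             return False
--         n, m = nm
--         if not (2 <= n <= 200000 and n - 1 <= m <= 200000) or idx + m >= total:
--             return False
--         comp = list(range(n))
--         cc = n
--         for j in range(1, m + 1):
--             e = ints(lines[idx + j], 3)
--             if e is None:
--                 return False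
--             u, v, w = e
--             if not (1 <= u <= n and 1 <= v <= n and -10**9 <= w <= 10**9):
--                 return False
--             cu, cv = comp[u - 1], comp[v - 1]
--             if cu != cv:
--                 comp = [cu if c == cv else c for c in comp]
--                 cc -= 1
--         if cc != 1:
--             return False
--         idx += m + 1
--     return idx == total
-- ===== Notes on version B (the rewrite author's own statement) =====
-- stated objective: simpler
-- what changed: The union-find (DSU with path compression and union by size) is replaced by a plain component-label array: each edge that joins two differently-labelled nodes rewrites one label into the other and decrements a live component counter; parsing is folded into one ints(line,k) helper.
import Mathlib
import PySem

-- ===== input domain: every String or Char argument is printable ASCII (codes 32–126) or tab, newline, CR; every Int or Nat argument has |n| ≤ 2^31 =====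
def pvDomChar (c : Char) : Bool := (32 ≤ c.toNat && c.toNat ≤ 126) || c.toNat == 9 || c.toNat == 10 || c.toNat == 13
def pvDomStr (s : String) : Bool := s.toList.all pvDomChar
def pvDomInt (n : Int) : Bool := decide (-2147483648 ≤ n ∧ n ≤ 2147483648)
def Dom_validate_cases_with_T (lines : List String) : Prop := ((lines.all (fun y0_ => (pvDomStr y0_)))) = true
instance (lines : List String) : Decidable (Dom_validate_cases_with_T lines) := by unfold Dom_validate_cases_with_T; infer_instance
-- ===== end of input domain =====

-- B replaces A's union-find connectivity test by a component-label array with a live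
-- component counter (objective: simpler); both validate the case format identically.

-- ===== PORT A =====
-- s.split(" "): the separator " " is non-empty, so Python's split never raises and
-- PySem.Str.split? is always `some`; both ports split lines this way.
def pvSplit (s : String) : List String := (PySem.Str.split? s " ").getD []

-- DSU node indices are the Python values u-1, v-1, which the guards force into 0..n-1,
-- so representing them as Nat is exact ((u-1).toNat is taken only under 1 ≤ u).
structure PvDSU where
  p : List Nat
  sz : List Nat
  cc : Int
  deriving Repr

def pvDsuInit (n : Nat) : PvDSU := ⟨List.range n, List.replicate n 1, (n : Int)⟩

-- `while p[a] != a: p[a] = p[p[a]]; a = p[a]` — fuel `p.length` is a totality guard only;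
-- under the loop invariant the root is reached earlier (proved below).
def pvFind : Nat → List Nat → Nat → List Nat × Nat
  | 0, p, a => (p, a)
  | fuel + 1, p, a =>
    if p.getD a 0 = a then (p, a)
    else
      let p1 := p.set a (p.getD (p.getD a 0) 0)
      pvFind fuel p1 (p1.getD a 0)

def pvUnion (d : PvDSU) (a b : Nat) : PvDSU :=
  let fa := pvFind d.p.length d.p a
  let fb := pvFind fa.1.length fa.1 b
  let p2 := fb.1
  let ra := fa.2
  let rb := fb.2
  if ra = rb then { d with p := p2 }
  else
    let rr := if d.sz.getD ra 0 < d.sz.getD rb 0 then (rb, ra) else (ra, rb)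
    { p := p2.set rr.2 rr.1,
      sz := d.sz.set rr.1 (d.sz.getD rr.1 0 + d.sz.getD rr.2 0),
      cc := d.cc - 1 }

-- `for j in range(1, m+1)` over the edge lines; `none` = an early `return (False, idx)`.
def pvEdgesA (lines : List String) (idx : Nat) (n : Int) : Nat → Nat → PvDSU → Option PvDSU
  | 0, _, d => some d
  | k + 1, j, d =>
    let parts := pvSplit (lines.getD (idx + j) "")
    if parts.length ≠ 3 then none
    else
      match PySem.Int.ofStr? (parts.getD 0 ""), PySem.Int.ofStr? (parts.getD 1 ""),
            PySem.Int.ofStr? (parts.getD 2 "") with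
      | some u, some v, some w =>
        if ¬(1 ≤ u ∧ u ≤ n ∧ 1 ≤ v ∧ v ≤ n) then none
        else if ¬(-(10 ^ 9 : Int) ≤ w ∧ w ≤ 10 ^ 9) then none
        else pvEdgesA lines idx n k (j + 1)
               (if u ≠ v then pvUnion d (u - 1).toNat (v - 1).toNat else d)
      | _, _, _ => none

def parse_one_case (lines : List String) (idx : Nat) : Bool × Nat :=
  if idx ≥ lines.length then (false, idx)
  else
    let parts := pvSplit (lines.getD idx "")
    if parts.length ≠ 2 then (false, idx)
    else
      match PySem.Int.ofStr? (parts.getD 0 ""), PySem.Int.ofStr? (parts.getD 1 "") with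
      | some n, some m =>
        if ¬(2 ≤ n ∧ n ≤ 200000) then (false, idx)
        else if ¬(n - 1 ≤ m ∧ m ≤ 200000) then (false, idx)
        else if (idx : Int) + m ≥ (lines.length : Int) then (false, idx)
        else
          match pvEdgesA lines idx n m.toNat 1 (pvDsuInit n.toNat) with
          | none => (false, idx)
          | some d => if d.cc ≠ 1 then (false, idx) else (true, idx + 1 + m.toNat)
      | _, _ => (false, idx)

-- `for _ in range(T)`; `none` = an early `return False`.
def pvCasesA (lines : List String) : Nat → Nat → Option Nat
  | 0, idx => some idx
  | t + 1, idx =>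
    let r := parse_one_case lines idx
    if r.1 then pvCasesA lines t r.2 else none

def validate_cases_with_T (lines : List String) : Bool :=
  match lines with
  | [] => false
  | l0 :: _ =>
    let parts := pvSplit l0
    if parts.length ≠ 1 then false
    else
      match PySem.Int.ofStr? (parts.getD 0 "") with
      | none => false
      | some T =>
        if T < 1 then false
        else
          match pvCasesA lines T.toNat 1 with
          | none => false
          | some idx => idx == lines.length

-- ===== PORT B =====
-- `[int(p) for p in parts]` under try/except ValueError
def pvParseAll : List String → Option (List Int)
  | [] => some []
  | t :: ts =>
    match PySem.Int.ofStr? t, pvParseAll ts with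
    | some x, some xs => some (x :: xs)
    | _, _ => none

def pvInts (s : String) (k : Nat) : Option (List Int) :=
  let parts := pvSplit s
  if parts.length ≠ k then none else pvParseAll parts

-- component labels: comp : List Nat (labels are initial node numbers 0..n-1), cc live count
def pvEdgesB (lines : List String) (idx : Nat) (n : Int) :
    Nat → Nat → List Nat × Int → Option (List Nat × Int)
  | 0, _, s => some s
  | k + 1, j, s =>
    match pvInts (lines.getD (idx + j) "") 3 with
    | some [u, v, w] =>
      if ¬(1 ≤ u ∧ u ≤ n ∧ 1 ≤ v ∧ v ≤ n ∧ -(10 ^ 9 : Int) ≤ w ∧ w ≤ 10 ^ 9) then none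
      else
        let cu := s.1.getD (u - 1).toNat 0
        let cv := s.1.getD (v - 1).toNat 0
        if cu ≠ cv then
          pvEdgesB lines idx n k (j + 1) (s.1.map (fun c => if c = cv then cu else c), s.2 - 1)
        else pvEdgesB lines idx n k (j + 1) s
    | _ => none

def pvCaseB (lines : List String) (total : Nat) (idx : Nat) : Option Nat :=
  match (if idx < total then pvInts (lines.getD idx "") 2 else none) with
  | some [n, m] =>
    if ¬((2 ≤ n ∧ n ≤ 200000) ∧ n - 1 ≤ m ∧ m ≤ 200000) ∨ (idx : Int) + m ≥ (total : Int) then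
      none
    else
      match pvEdgesB lines idx n m.toNat 1 (List.range n.toNat, n) with
      | none => none
      | some s => if s.2 ≠ 1 then none else some (idx + (m.toNat + 1))
  | _ => none

def pvCasesB (lines : List String) (total : Nat) : Nat → Nat → Option Nat
  | 0, idx => some idx
  | t + 1, idx =>
    match pvCaseB lines total idx with
    | none => none
    | some idx2 => pvCasesB lines total t idx2

def validate_cases_with_T_alt (lines : List String) : Bool :=
  match lines with
  | [] => false
  | l0 :: _ =>
    match pvInts l0 1 with
    | some [t] =>
      if t < 1 then false
      else
        match pvCasesB lines lines.length t.toNat 1 with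
        | none => false
        | some idx => idx == lines.length
    | _ => false

-- ===== PRECONDITION & SPEC =====
def Spec_validate_cases_with_T (lines : List String) (out : Bool) : Prop := out = validate_cases_with_T_alt lines
instance (lines : List String) (out : Bool) : Decidable (Spec_validate_cases_with_T lines out) := by unfold Spec_validate_cases_with_T; infer_instance

-- ===== CLAIM (what is proved, stated in full; the proofs are below) =====
def Claim_equal_validate_cases_with_T : Prop := ∀ (lines : List String), Dom_validate_cases_with_T lines → Spec_validate_cases_with_T lines (validate_cases_with_T lines)

-- ===== LEMMAS AND PROOFS =====

-- getD-level facts about set/map/range used throughout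
theorem pvGetD_set (p : List Nat) (i x v : Nat) (hi : i < p.length) :
    (p.set i v).getD x 0 = if x = i then v else p.getD x 0 := by
  by_cases h : x = i
  · subst h; simp [List.getD, hi]
  · simp [List.getD, List.getElem?_set_ne (by omega : i ≠ x), h]

theorem pvGetD_map (l : List Nat) (f : Nat → Nat) (x : Nat) (hx : x < l.length) :
    (l.map f).getD x 0 = f (l.getD x 0) := by
  simp [List.getD, List.getElem?_eq_getElem hx, List.getElem?_map]

theorem pvGetD_range (n x : Nat) (hx : x < n) : (List.range n).getD x 0 = x := by
  simp [List.getD, List.getElem?_range hx]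

-- parent-chain iteration (proof-side view of the DSU parent array)
def pvIter (p : List Nat) : Nat → Nat → Nat
  | 0, a => a
  | k + 1, a => pvIter p k (p.getD a 0)

-- well-formed parent array: in range and every chain reaches a fixpoint (a root)
def pvGood (n : Nat) (p : List Nat) : Prop :=
  p.length = n ∧ (∀ a, a < n → p.getD a 0 < n) ∧
    ∀ a, a < n → ∃ k, p.getD (pvIter p k a) 0 = pvIter p k a

-- the root of a's chain (fuel p.length suffices under pvGood, proved below)
def pvRoot (p : List Nat) (a : Nat) : Nat := pvIter p p.length a

theorem pvIter_add (p : List Nat) (i j a : Nat) :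
    pvIter p (i + j) a = pvIter p i (pvIter p j a) := by
  induction j generalizing a with
  | zero => rfl
  | succ j ih => rw [show i + (j+1) = (i+j) + 1 by omega]; exact ih (p.getD a 0)

theorem pvIter_absorb (p : List Nat) (r : Nat) (hr : p.getD r 0 = r) (k : Nat) :
    pvIter p k r = r := by
  induction k with
  | zero => rfl
  | succ k ih => show pvIter p k (p.getD r 0) = r; rw [hr]; exact ih

theorem pvIter_stable (p : List Nat) (a k : Nat)
    (hk : p.getD (pvIter p k a) 0 = pvIter p k a) (j : Nat) (hj : k ≤ j) :
    pvIter p j a = pvIter p k a := by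
  rw [show j = (j - k) + k by omega, pvIter_add]
  exact pvIter_absorb p _ hk _

theorem pvIter_lt (n : Nat) (p : List Nat) (hp : ∀ a, a < n → p.getD a 0 < n)
    (a : Nat) (ha : a < n) (k : Nat) : pvIter p k a < n := by
  induction k generalizing a with
  | zero => exact ha
  | succ k ih => exact ih (p.getD a 0) (hp a ha)

-- pigeonhole: the minimal root index of a chain is < n
theorem pvDepth_lt (n : Nat) (p : List Nat) (hg : pvGood n p) (a : Nat) (ha : a < n)
    (h : ∃ k, p.getD (pvIter p k a) 0 = pvIter p k a) : Nat.find h < n := by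
  set k := Nat.find h with hk
  have hroot := Nat.find_spec h
  have hinj : Function.Injective (fun i : Fin (k + 1) => (⟨pvIter p i a,
      pvIter_lt n p hg.2.1 a ha i⟩ : Fin n)) := by
    intro i j hij
    simp only [Fin.mk.injEq] at hij
    by_contra hne
    rcases Nat.lt_or_ge i.1 j.1 with hlt | hge
    · have : pvIter p ((k - j.1) + i.1) a = pvIter p k a := by
        rw [pvIter_add, hij, ← pvIter_add, Nat.sub_add_cancel (by omega)]
      have hsm : (k - j.1) + i.1 < k := by omega
      exact Nat.find_min h hsm (by rw [this]; exact hroot)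
    · have hlt : j.1 < i.1 := by
        rcases Nat.lt_or_ge j.1 i.1 with h' | h'
        · exact h'
        · exact absurd (Fin.ext (by omega)) hne
      have : pvIter p ((k - i.1) + j.1) a = pvIter p k a := by
        rw [pvIter_add, ← hij, ← pvIter_add, Nat.sub_add_cancel (by omega)]
      have hsm : (k - i.1) + j.1 < k := by omega
      exact Nat.find_min h hsm (by rw [this]; exact hroot)
  have := Fintype.card_le_of_injective _ hinj
  simpa using this

theorem pvRoot_eq_iter (n : Nat) (p : List Nat) (hg : pvGood n p) (a : Nat) (_ha : a < n)
    (k : Nat) (hk : p.getD (pvIter p k a) 0 = pvIter p k a) (hkn : k ≤ n) :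
    pvRoot p a = pvIter p k a := by
  have := pvIter_stable p a k hk n hkn
  rw [pvRoot, hg.1, this]

theorem pvRoot_isRoot (n : Nat) (p : List Nat) (hg : pvGood n p) (a : Nat) (ha : a < n) :
    p.getD (pvRoot p a) 0 = pvRoot p a := by
  have h := hg.2.2 a ha
  have hk := Nat.find_spec h
  have hlt := pvDepth_lt n p hg a ha h
  rw [pvRoot_eq_iter n p hg a ha _ hk (by omega)]
  exact hk

theorem pvRoot_of_isRoot (p : List Nat) (r : Nat) (hr : p.getD r 0 = r) :
    pvRoot p r = r := pvIter_absorb p r hr _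

theorem pvRoot_lt (n : Nat) (p : List Nat) (hg : pvGood n p) (a : Nat) (ha : a < n) :
    pvRoot p a < n := by
  rw [pvRoot, hg.1]; exact pvIter_lt n p hg.2.1 a ha _

theorem pvRoot_step (n : Nat) (p : List Nat) (hg : pvGood n p) (a : Nat) (ha : a < n) :
    pvRoot p (p.getD a 0) = pvRoot p a := by
  have h := hg.2.2 a ha
  have hk := Nat.find_spec h
  have hlt := pvDepth_lt n p hg a ha h
  set k := Nat.find h with hkdef
  have h1 : pvIter p k (p.getD a 0) = pvIter p k a := by
    have e1 : pvIter p (k + 1) a = pvIter p k (p.getD a 0) := by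
      rw [show k + 1 = k + (0 + 1) by omega, pvIter_add]; rfl
    have e2 := pvIter_stable p a k hk (k + 1) (by omega)
    rw [← e1, e2]
  have hroot' : p.getD (pvIter p k (p.getD a 0)) 0 = pvIter p k (p.getD a 0) := by
    rw [h1]; exact hk
  rw [pvRoot_eq_iter n p hg (p.getD a 0) (hg.2.1 a ha) k hroot' (by omega), h1,
    pvRoot_eq_iter n p hg a ha k hk (by omega)]

theorem pvRoot_iter (n : Nat) (p : List Nat) (hg : pvGood n p) (a : Nat) (ha : a < n)
    (k : Nat) : pvRoot p (pvIter p k a) = pvRoot p a := by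
  induction k generalizing a with
  | zero => rfl
  | succ k ih =>
    show pvRoot p (pvIter p k (p.getD a 0)) = pvRoot p a
    rw [ih (p.getD a 0) (hg.2.1 a ha), pvRoot_step n p hg a ha]

-- path-compression step: chains shorten, roots do not move
theorem pvCompress_transfer (n : Nat) (p : List Nat) (hg : pvGood n p) (a : Nat)
    (ha : a < n) (hna : p.getD a 0 ≠ a) :
    ∀ k x, x < n → p.getD (pvIter p k x) 0 = pvIter p k x →
      ∃ k' ≤ k, pvIter (p.set a (p.getD (p.getD a 0) 0)) k' x = pvIter p k x ∧
        (p.set a (p.getD (p.getD a 0) 0)).getD (pvIter p k x) 0 = pvIter p k x := by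
  intro k
  induction k using Nat.strong_induction_on with
  | _ k ih =>
    intro x hx hroot
    have hlen : a < p.length := by rw [hg.1]; exact ha
    have hgd : ∀ y, (p.set a (p.getD (p.getD a 0) 0)).getD y 0 =
        if y = a then p.getD (p.getD a 0) 0 else p.getD y 0 :=
      fun y => pvGetD_set p a y _ hlen
    by_cases hxr : p.getD x 0 = x
    · have hiter : pvIter p k x = x := pvIter_absorb p x hxr k
      have hxa : x ≠ a := fun he => hna (by rw [← he]; exact hxr)
      refine ⟨0, by omega, by rw [hiter]; rfl, ?_⟩
      rw [hiter, hgd x, if_neg hxa]; exact hxr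
    · have hk1 : 1 ≤ k := by
        rcases k with _ | k
        · exact absurd hroot hxr
        · omega
      by_cases hxa : x = a
      · subst hxa
        by_cases hpar : p.getD (p.getD x 0) 0 = p.getD x 0
        · have hiter1 : pvIter p k x = p.getD x 0 := by
            rw [show k = (k-1)+1 by omega]
            show pvIter p (k-1) (p.getD x 0) = p.getD x 0
            exact pvIter_absorb p _ hpar _
          refine ⟨1, hk1, ?_, ?_⟩
          · show pvIter (p.set x (p.getD (p.getD x 0) 0)) 1 x = pvIter p k x
            rw [hiter1]
            show (p.set x (p.getD (p.getD x 0) 0)).getD x 0 = p.getD x 0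
            rw [hgd x, if_pos rfl]; exact hpar
          · rw [hiter1, hgd _, if_neg hxr]; exact hpar
        · have hk2 : 2 ≤ k := by
            rcases k with _ | _ | k
            · omega
            · exact absurd hroot hpar
            · omega
          have hga : pvIter p 2 x = p.getD (p.getD x 0) 0 := rfl
          have hrw : pvIter p k x = pvIter p (k-2) (p.getD (p.getD x 0) 0) := by
            conv_lhs => rw [show k = (k-2) + 2 by omega]
            rw [pvIter_add, hga]
          have hroot' : p.getD (pvIter p (k-2) (p.getD (p.getD x 0) 0)) 0 =
              pvIter p (k-2) (p.getD (p.getD x 0) 0) := by rw [← hrw]; exact hroot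
          have hgn : p.getD (p.getD x 0) 0 < n := hg.2.1 _ (hg.2.1 x hx)
          obtain ⟨k', hk'le, hk'eq, hk'root⟩ := ih (k-2) (by omega) _ hgn hroot'
          refine ⟨k'+1, by omega, ?_, by rw [hrw]; exact hk'root⟩
          show pvIter (p.set x (p.getD (p.getD x 0) 0)) k'
              ((p.set x (p.getD (p.getD x 0) 0)).getD x 0) = pvIter p k x
          rw [hgd x, if_pos rfl, hk'eq, ← hrw]
      · have hrw : pvIter p k x = pvIter p (k-1) (p.getD x 0) := by
          conv_lhs => rw [show k = (k-1)+1 by omega]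
          rfl
        have hroot' : p.getD (pvIter p (k-1) (p.getD x 0)) 0 =
            pvIter p (k-1) (p.getD x 0) := by rw [← hrw]; exact hroot
        obtain ⟨k', hk'le, hk'eq, hk'root⟩ :=
          ih (k-1) (by omega) (p.getD x 0) (hg.2.1 x hx) hroot'
        refine ⟨k'+1, by omega, ?_, by rw [hrw]; exact (by rw [← hrw] at hk'root ⊢; exact hk'root)⟩
        show pvIter (p.set a (p.getD (p.getD a 0) 0)) k'
            ((p.set a (p.getD (p.getD a 0) 0)).getD x 0) = pvIter p k x
        rw [hgd x, if_neg hxa, hk'eq, ← hrw]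

theorem pvCompress_good (n : Nat) (p : List Nat) (hg : pvGood n p) (a : Nat)
    (ha : a < n) (hna : p.getD a 0 ≠ a) :
    pvGood n (p.set a (p.getD (p.getD a 0) 0)) ∧
      ∀ x, x < n → pvRoot (p.set a (p.getD (p.getD a 0) 0)) x = pvRoot p x := by
  have hlen : a < p.length := by rw [hg.1]; exact ha
  have hgd : ∀ y, (p.set a (p.getD (p.getD a 0) 0)).getD y 0 =
      if y = a then p.getD (p.getD a 0) 0 else p.getD y 0 :=
    fun y => pvGetD_set p a y _ hlen
  have hgood1 : pvGood n (p.set a (p.getD (p.getD a 0) 0)) := by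
    refine ⟨by simp [hg.1], ?_, ?_⟩
    · intro x hx
      rw [hgd x]
      split
      · exact hg.2.1 _ (hg.2.1 a ha)
      · exact hg.2.1 x hx
    · intro x hx
      obtain ⟨k, hk⟩ := hg.2.2 x hx
      obtain ⟨k', _, hkeq, hkroot⟩ := pvCompress_transfer n p hg a ha hna k x hx hk
      exact ⟨k', by rw [hkeq]; exact hkroot⟩
  refine ⟨hgood1, ?_⟩
  intro x hx
  have h := hg.2.2 x hx
  have hk := Nat.find_spec h
  have hklt := pvDepth_lt n p hg x hx h
  obtain ⟨k', hk'le, hkeq, hkroot⟩ :=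
    pvCompress_transfer n p hg a ha hna (Nat.find h) x hx hk
  rw [pvRoot_eq_iter n p hg x hx (Nat.find h) hk (by omega),
    pvRoot_eq_iter n (p.set a (p.getD (p.getD a 0) 0)) hgood1 x hx k'
      (by rw [hkeq]; exact hkroot) (by omega), hkeq]

-- the find loop: returns the root, preserves pvGood and every root
theorem pvFind_spec (n : Nat) : ∀ fuel p a K, pvGood n p → a < n →
    p.getD (pvIter p K a) 0 = pvIter p K a → K ≤ fuel →
    (pvFind fuel p a).2 = pvRoot p a ∧ pvGood n (pvFind fuel p a).1 ∧
      ∀ x, x < n → pvRoot (pvFind fuel p a).1 x = pvRoot p x := by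
  intro fuel
  induction fuel with
  | zero =>
    intro p a K hg ha hroot hK
    have hK0 : K = 0 := by omega
    subst hK0
    exact ⟨(pvRoot_of_isRoot p a hroot).symm, hg, fun x hx => rfl⟩
  | succ fuel ih =>
    intro p a K hg ha hroot hK
    by_cases hra : p.getD a 0 = a
    · simp only [pvFind, if_pos hra]
      exact ⟨(pvRoot_of_isRoot p a hra).symm, hg, by simp⟩
    · simp only [pvFind, if_neg hra]
      have hlen : a < p.length := by rw [hg.1]; exact ha
      have e_a1 : (p.set a (p.getD (p.getD a 0) 0)).getD a 0 = p.getD (p.getD a 0) 0 := by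
        rw [pvGetD_set p a a _ hlen, if_pos rfl]
      obtain ⟨hgood1, hroots1⟩ := pvCompress_good n p hg a ha hra
      have hgn : p.getD (p.getD a 0) 0 < n := hg.2.1 _ (hg.2.1 a ha)
      have h := hg.2.2 a ha
      have hkmin : Nat.find h ≤ K := Nat.find_min' h hroot
      have hkspec := Nat.find_spec h
      have hk1 : 1 ≤ Nat.find h := by
        rcases Nat.eq_zero_or_pos (Nat.find h) with h0 | h0
        · rw [h0] at hkspec; exact absurd hkspec hra
        · omega
      -- a root index K1 ≤ fuel for the grandparent in the compressed array
      have hK1 : ∃ K1 ≤ fuel, (p.set a (p.getD (p.getD a 0) 0)).getD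
          (pvIter (p.set a (p.getD (p.getD a 0) 0)) K1 (p.getD (p.getD a 0) 0)) 0 =
          pvIter (p.set a (p.getD (p.getD a 0) 0)) K1 (p.getD (p.getD a 0) 0) := by
        by_cases hpar : p.getD (p.getD a 0) 0 = p.getD a 0
        · refine ⟨0, by omega, ?_⟩
          show (p.set a (p.getD (p.getD a 0) 0)).getD (p.getD (p.getD a 0) 0) 0 =
            p.getD (p.getD a 0) 0
          have hne : p.getD (p.getD a 0) 0 ≠ a := by rw [hpar]; exact hra
          rw [pvGetD_set p a _ _ hlen, if_neg hne, hpar]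
          exact hpar
        · have hk2 : 2 ≤ Nat.find h := by
            by_contra hlt
            have h1 : Nat.find h = 1 := by omega
            rw [h1] at hkspec
            exact hpar hkspec
          have hga : pvIter p 2 a = p.getD (p.getD a 0) 0 := rfl
          have hrw : pvIter p (Nat.find h) a =
              pvIter p (Nat.find h - 2) (p.getD (p.getD a 0) 0) := by
            conv_lhs => rw [show Nat.find h = (Nat.find h - 2) + 2 by omega]
            rw [pvIter_add, hga]
          have hroot' : p.getD (pvIter p (Nat.find h - 2) (p.getD (p.getD a 0) 0)) 0 =
              pvIter p (Nat.find h - 2) (p.getD (p.getD a 0) 0) := by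
            rw [← hrw]; exact hkspec
          obtain ⟨k', hk'le, hkeq, hkroot⟩ :=
            pvCompress_transfer n p hg a ha hra (Nat.find h - 2) _ hgn hroot'
          exact ⟨k', by omega, by rw [hkeq]; exact hkroot⟩
      obtain ⟨K1, hK1le, hK1root⟩ := hK1
      have hres := ih (p.set a (p.getD (p.getD a 0) 0)) (p.getD (p.getD a 0) 0) K1
        hgood1 hgn hK1root hK1le
      rw [e_a1]
      refine ⟨?_, hres.2.1, ?_⟩
      · rw [hres.1, hroots1 _ hgn]
        exact pvRoot_iter n p hg a ha 2
      · intro x hx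
        rw [hres.2.2 x hx, hroots1 x hx]

-- chains that avoid the updated root are untouched by the union write
theorem pvSet_chain (q : List Nat) (rb ra : Nat) (hrb : rb < q.length) :
    ∀ j x, (∀ i, i < j → pvIter q i x ≠ rb) → pvIter (q.set rb ra) j x = pvIter q j x := by
  intro j
  induction j with
  | zero => intro x _; rfl
  | succ j ih =>
    intro x hx
    have hx0 : x ≠ rb := hx 0 (by omega)
    show pvIter (q.set rb ra) j ((q.set rb ra).getD x 0) = pvIter q j (q.getD x 0)
    rw [pvGetD_set q rb x ra hrb, if_neg hx0]
    exact ih (q.getD x 0) (fun i hi => hx (i + 1) (by omega))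

-- writing p[rb] := ra (both roots, ra ≠ rb) redirects exactly the rb-class to ra
theorem pvUnionSet (n : Nat) (q : List Nat) (hg : pvGood n q) (ra rb : Nat)
    (hran : ra < n) (hrbn : rb < n) (hroot_a : q.getD ra 0 = ra)
    (hroot_b : q.getD rb 0 = rb) (hne : ra ≠ rb) :
    pvGood n (q.set rb ra) ∧
      ∀ x, x < n → pvRoot (q.set rb ra) x = if pvRoot q x = rb then ra else pvRoot q x := by
  have hrblen : rb < q.length := by rw [hg.1]; exact hrbn
  have hset_b : (q.set rb ra).getD rb 0 = ra := by rw [pvGetD_set q rb rb ra hrblen, if_pos rfl]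
  have hset_a : (q.set rb ra).getD ra 0 = ra := by
    rw [pvGetD_set q rb ra ra hrblen, if_neg hne]; exact hroot_a
  have key : ∀ x, x < n → ∃ K, K ≤ n ∧
      pvIter (q.set rb ra) K x = (if pvRoot q x = rb then ra else pvRoot q x) ∧
      (q.set rb ra).getD (if pvRoot q x = rb then ra else pvRoot q x) 0 =
        (if pvRoot q x = rb then ra else pvRoot q x) := by
    intro x hx
    have h := hg.2.2 x hx
    have hk := Nat.find_spec h
    have hklt := pvDepth_lt n q hg x hx h
    have hrx : pvRoot q x = pvIter q (Nat.find h) x :=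
      pvRoot_eq_iter n q hg x hx (Nat.find h) hk (by omega)
    by_cases hcase : pvRoot q x = rb
    · have hchain : ∀ i, i < Nat.find h → pvIter q i x ≠ rb := by
        intro i hik heq
        exact Nat.find_min h hik (by rw [heq]; exact hroot_b)
      have hc : pvIter (q.set rb ra) (Nat.find h) x = rb := by
        rw [pvSet_chain q rb ra hrblen _ x hchain, ← hrx, hcase]
      refine ⟨1 + Nat.find h, by omega, ?_, ?_⟩
      · rw [pvIter_add, hc, if_pos hcase]
        exact hset_b
      · rw [if_pos hcase]; exact hset_a
    · have hchain : ∀ i, i < Nat.find h → pvIter q i x ≠ rb := by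
        intro i hik heq
        apply hcase
        have h1 : pvRoot q (pvIter q i x) = pvRoot q x := pvRoot_iter n q hg x hx i
        rw [heq, pvRoot_of_isRoot q rb hroot_b] at h1
        omega
      refine ⟨Nat.find h, by omega, ?_, ?_⟩
      · rw [pvSet_chain q rb ra hrblen _ x hchain, ← hrx, if_neg hcase]
      · rw [if_neg hcase]
        have hrootx : q.getD (pvRoot q x) 0 = pvRoot q x := pvRoot_isRoot n q hg x hx
        rw [pvGetD_set q rb _ ra hrblen, if_neg hcase]
        exact hrootx
  have hgood2 : pvGood n (q.set rb ra) := by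
    refine ⟨by simp [hg.1], ?_, ?_⟩
    · intro y hy
      rw [pvGetD_set q rb y ra hrblen]
      split
      · exact hran
      · exact hg.2.1 y hy
    · intro x hx
      obtain ⟨K, _, hKiter, hKroot⟩ := key x hx
      exact ⟨K, by rw [hKiter]; exact hKroot⟩
  refine ⟨hgood2, ?_⟩
  intro x hx
  obtain ⟨K, hKle, hKiter, hKroot⟩ := key x hx
  rw [pvRoot_eq_iter n (q.set rb ra) hgood2 x hx K (by rw [hKiter]; exact hKroot) hKle, hKiter]

theorem pvCollapse_iff (u v x y : Nat) (_huv : u ≠ v) :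
    ((if x = v then u else x) = (if y = v then u else y)) ↔
      (x = y ∨ ((x = u ∨ x = v) ∧ (y = u ∨ y = v))) := by
  split_ifs <;> omega

-- one union: cc drops exactly when the two roots differ; classes merge
theorem pvUnion_spec (n : Nat) (d : PvDSU) (hg : pvGood n d.p) (a b : Nat)
    (ha : a < n) (hb : b < n) :
    pvGood n (pvUnion d a b).p ∧
      (pvUnion d a b).cc = (if pvRoot d.p a = pvRoot d.p b then d.cc else d.cc - 1) ∧
      ∀ x y, x < n → y < n →
        (pvRoot (pvUnion d a b).p x = pvRoot (pvUnion d a b).p y ↔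
          (pvRoot d.p x = pvRoot d.p y ∨
            ((pvRoot d.p x = pvRoot d.p a ∨ pvRoot d.p x = pvRoot d.p b) ∧
             (pvRoot d.p y = pvRoot d.p a ∨ pvRoot d.p y = pvRoot d.p b)))) := by
  have hlen : d.p.length = n := hg.1
  -- first find
  have h1 := hg.2.2 a ha
  have hF1 := pvFind_spec n d.p.length d.p a (Nat.find h1) hg ha (Nat.find_spec h1)
    (by have := pvDepth_lt n d.p hg a ha h1; omega)
  set p1 := (pvFind d.p.length d.p a).1 with hp1
  set ra := (pvFind d.p.length d.p a).2 with hra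
  obtain ⟨hra_eq, hgood1, hroots1⟩ := hF1
  -- second find
  have h2 := hgood1.2.2 b hb
  have hF2 := pvFind_spec n p1.length p1 b (Nat.find h2) hgood1 hb (Nat.find_spec h2)
    (by have := pvDepth_lt n p1 hgood1 b hb h2; rw [hgood1.1]; omega)
  set p2 := (pvFind p1.length p1 b).1 with hp2
  set rb := (pvFind p1.length p1 b).2 with hrb
  obtain ⟨hrb_eq, hgood2, hroots2⟩ := hF2
  have hRA : ra = pvRoot d.p a := hra_eq
  have hRB : rb = pvRoot d.p b := by rw [hrb_eq, hroots1 b hb]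
  have hroots2' : ∀ x, x < n → pvRoot p2 x = pvRoot d.p x := by
    intro x hx; rw [hroots2 x hx, hroots1 x hx]
  have hran : ra < n := by rw [hRA]; exact pvRoot_lt n d.p hg a ha
  have hrbn : rb < n := by rw [hRB]; exact pvRoot_lt n d.p hg b hb
  have hroot_ra : p2.getD ra 0 = ra := by
    have := pvRoot_isRoot n p2 hgood2 a ha
    rw [hroots2' a ha, ← hRA] at this
    exact this
  have hroot_rb : p2.getD rb 0 = rb := by
    have := pvRoot_isRoot n p2 hgood2 b hb
    rw [hroots2' b hb, ← hRB] at this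
    exact this
  show pvGood n (pvUnion d a b).p ∧ _ ∧ _
  rw [pvUnion]
  simp only [← hp1, ← hra, ← hp2, ← hrb]
  by_cases hcase : ra = rb
  · simp only [if_pos hcase]
    refine ⟨hgood2, by rw [if_pos (by rw [← hRA, ← hRB]; exact hcase)], ?_⟩
    intro x y hx hy
    rw [hroots2' x hx, hroots2' y hy]
    constructor
    · exact fun h => Or.inl h
    · rintro (h | ⟨hx', hy'⟩)
      · exact h
      · rw [← hRA, ← hRB, ← hcase] at hx' hy'
        have ex : pvRoot d.p x = ra := by rcases hx' with h | h <;> omega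
        have ey : pvRoot d.p y = ra := by rcases hy' with h | h <;> omega
        omega
  · simp only [if_neg hcase]
    have hcond : ¬ (pvRoot d.p a = pvRoot d.p b) := by rw [← hRA, ← hRB]; exact hcase
    -- the two swap branches only exchange the roles of ra and rb
    have main : ∀ u v : Nat, u ≠ v → ((u = ra ∧ v = rb) ∨ (u = rb ∧ v = ra)) →
        pvGood n (p2.set v u) ∧
        (∀ x y, x < n → y < n →
          (pvRoot (p2.set v u) x = pvRoot (p2.set v u) y ↔
            (pvRoot d.p x = pvRoot d.p y ∨
              ((pvRoot d.p x = pvRoot d.p a ∨ pvRoot d.p x = pvRoot d.p b) ∧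
               (pvRoot d.p y = pvRoot d.p a ∨ pvRoot d.p y = pvRoot d.p b))))) := by
      intro u v huv hcases
      have hun : u < n := by rcases hcases with ⟨h', _⟩ | ⟨h', _⟩ <;> rw [h'] <;> assumption
      have hvn : v < n := by rcases hcases with ⟨_, h'⟩ | ⟨_, h'⟩ <;> rw [h'] <;> assumption
      have hru : p2.getD u 0 = u := by
        rcases hcases with ⟨h', _⟩ | ⟨h', _⟩ <;> rw [h'] <;> assumption
      have hrv : p2.getD v 0 = v := by
        rcases hcases with ⟨_, h'⟩ | ⟨_, h'⟩ <;> rw [h'] <;> assumption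
      obtain ⟨hgood3, hroots3⟩ := pvUnionSet n p2 hgood2 u v hun hvn hru hrv huv
      refine ⟨hgood3, ?_⟩
      intro x y hx hy
      rw [hroots3 x hx, hroots3 y hy,
        pvCollapse_iff u v (pvRoot p2 x) (pvRoot p2 y) huv,
        hroots2' x hx, hroots2' y hy]
      rcases hcases with ⟨hu', hv'⟩ | ⟨hu', hv'⟩ <;>
        rw [hu', hv', hRA, hRB] <;> constructor <;>
        (rintro (h' | ⟨hx', hy'⟩)
         · exact Or.inl h'
         · exact Or.inr ⟨by tauto, by tauto⟩)
    split
    · exact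
        let r := main rb ra (fun he => hcase he.symm) (Or.inr ⟨rfl, rfl⟩)
        ⟨r.1, by simp, r.2⟩
    · exact
        let r := main ra rb hcase (Or.inl ⟨rfl, rfl⟩)
        ⟨r.1, by simp, r.2⟩

-- simulation invariant between A's DSU and B's label array
def pvRel (n : Nat) (d : PvDSU) (s : List Nat × Int) : Prop :=
  pvGood n d.p ∧ s.1.length = n ∧ d.cc = s.2 ∧
    ∀ x y, x < n → y < n →
      (pvRoot d.p x = pvRoot d.p y ↔ s.1.getD x 0 = s.1.getD y 0)

theorem pvRel_init (nN : Nat) : pvRel nN (pvDsuInit nN) (List.range nN, (nN : Int)) := by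
  have hroot : ∀ x, x < nN → (List.range nN).getD x 0 = x := fun x hx => pvGetD_range nN x hx
  have hgood : pvGood nN (List.range nN) := by
    refine ⟨by simp, ?_, ?_⟩
    · intro x hx; rw [hroot x hx]; exact hx
    · intro x hx
      exact ⟨0, by rw [show pvIter (List.range nN) 0 x = x from rfl, hroot x hx]⟩
  have hrootval : ∀ x, x < nN → pvRoot (List.range nN) x = x :=
    fun x hx => pvRoot_of_isRoot _ x (hroot x hx)
  refine ⟨hgood, by simp, rfl, ?_⟩
  intro x y hx hy
  show pvRoot (List.range nN) x = pvRoot (List.range nN) y ↔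
    (List.range nN).getD x 0 = (List.range nN).getD y 0
  rw [hrootval x hx, hrootval y hy, hroot x hx, hroot y hy]

theorem pvRel_edge (nI : Int) (nN : Nat) (hn : nN = nI.toNat) (d : PvDSU)
    (s : List Nat × Int) (hrel : pvRel nN d s) (u v : Int)
    (hu : 1 ≤ u ∧ u ≤ nI) (hv : 1 ≤ v ∧ v ≤ nI) :
    pvRel nN (if u ≠ v then pvUnion d (u - 1).toNat (v - 1).toNat else d)
      (if s.1.getD (u - 1).toNat 0 ≠ s.1.getD (v - 1).toNat 0 then
        (s.1.map (fun c => if c = s.1.getD (v - 1).toNat 0 then s.1.getD (u - 1).toNat 0 else c),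
         s.2 - 1)
       else s) := by
  obtain ⟨hgood, hslen, hcc, hiff⟩ := hrel
  have ha : (u - 1).toNat < nN := by omega
  have hb : (v - 1).toNat < nN := by omega
  by_cases huv : u = v
  · subst huv
    rw [if_neg (by simp), if_neg (by simp)]
    exact ⟨hgood, hslen, hcc, hiff⟩
  · rw [if_pos (by exact huv)]
    obtain ⟨hgood', hcc', hiff'⟩ := pvUnion_spec nN d hgood _ _ ha hb
    have hlab : pvRoot d.p (u - 1).toNat = pvRoot d.p (v - 1).toNat ↔
        s.1.getD (u - 1).toNat 0 = s.1.getD (v - 1).toNat 0 := hiff _ _ ha hb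
    by_cases hsame : s.1.getD (u - 1).toNat 0 = s.1.getD (v - 1).toNat 0
    · rw [if_neg (by simpa using hsame)]
      refine ⟨hgood', hslen, ?_, ?_⟩
      · rw [hcc', if_pos (hlab.mpr hsame)]; exact hcc
      · intro x y hx hy
        rw [hiff' x y hx hy, ← hiff x y hx hy]
        have hab : pvRoot d.p (u - 1).toNat = pvRoot d.p (v - 1).toNat := hlab.mpr hsame
        constructor
        · rintro (h | ⟨hx', hy'⟩)
          · exact h
          · have ex : pvRoot d.p x = pvRoot d.p (u - 1).toNat := by rcases hx' with h | h <;> omega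
            have ey : pvRoot d.p y = pvRoot d.p (u - 1).toNat := by rcases hy' with h | h <;> omega
            omega
        · exact fun h => Or.inl h
    · rw [if_pos (by simpa using hsame)]
      refine ⟨hgood', by simpa using hslen, ?_, ?_⟩
      · rw [hcc', if_neg (fun h => hsame (hlab.mp h))]; omega
      · intro x y hx hy
        have hgx : (s.1.map (fun c => if c = s.1.getD (v - 1).toNat 0
            then s.1.getD (u - 1).toNat 0 else c)).getD x 0 =
            (if s.1.getD x 0 = s.1.getD (v - 1).toNat 0
             then s.1.getD (u - 1).toNat 0 else s.1.getD x 0) :=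
          pvGetD_map s.1 _ x (by rw [hslen]; exact hx)
        have hgy : (s.1.map (fun c => if c = s.1.getD (v - 1).toNat 0
            then s.1.getD (u - 1).toNat 0 else c)).getD y 0 =
            (if s.1.getD y 0 = s.1.getD (v - 1).toNat 0
             then s.1.getD (u - 1).toNat 0 else s.1.getD y 0) :=
          pvGetD_map s.1 _ y (by rw [hslen]; exact hy)
        show _ ↔ _
        rw [hiff' x y hx hy, hgx, hgy,
          pvCollapse_iff _ _ (s.1.getD x 0) (s.1.getD y 0) hsame,
          ← hiff x y hx hy]
        have e1 : pvRoot d.p x = pvRoot d.p (u - 1).toNat ↔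
            s.1.getD x 0 = s.1.getD (u - 1).toNat 0 := hiff _ _ hx ha
        have e2 : pvRoot d.p x = pvRoot d.p (v - 1).toNat ↔
            s.1.getD x 0 = s.1.getD (v - 1).toNat 0 := hiff _ _ hx hb
        have e3 : pvRoot d.p y = pvRoot d.p (u - 1).toNat ↔
            s.1.getD y 0 = s.1.getD (u - 1).toNat 0 := hiff _ _ hy ha
        have e4 : pvRoot d.p y = pvRoot d.p (v - 1).toNat ↔
            s.1.getD y 0 = s.1.getD (v - 1).toNat 0 := hiff _ _ hy hb
        rw [e1, e2, e3, e4]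

-- the two edge loops fail together or end in related states
theorem pvEdges_rel (lines : List String) (idx : Nat) (nI : Int) :
    ∀ k j d s, pvRel nI.toNat d s →
      (pvEdgesA lines idx nI k j d = none ∧ pvEdgesB lines idx nI k j s = none) ∨
      (∃ d' s', pvEdgesA lines idx nI k j d = some d' ∧
        pvEdgesB lines idx nI k j s = some s' ∧ pvRel nI.toNat d' s') := by
  intro k
  induction k with
  | zero =>
    intro j d s hrel
    exact Or.inr ⟨d, s, rfl, rfl, hrel⟩
  | succ k ih =>
    intro j d s hrel
    simp only [pvEdgesA, pvEdgesB, pvInts]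
    by_cases hlen3 : (pvSplit (lines.getD (idx + j) "")).length = 3
    · obtain ⟨s0, s1, s2, hparts⟩ := List.length_eq_three.mp hlen3
      rw [hparts]
      simp only [List.length_cons, List.length_nil, List.getD_cons_zero, List.getD_cons_succ]
      rcases o0 : PySem.Int.ofStr? s0 with _ | u
      · simp only [pvParseAll, o0]
        exact Or.inl ⟨rfl, rfl⟩
      · rcases o1 : PySem.Int.ofStr? s1 with _ | v
        · simp only [pvParseAll, o0, o1]
          exact Or.inl ⟨rfl, rfl⟩
        · rcases o2 : PySem.Int.ofStr? s2 with _ | w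
          · simp only [pvParseAll, o0, o1, o2]
            exact Or.inl ⟨rfl, rfl⟩
          · simp only [pvParseAll, o0, o1, o2]
            simp only [ne_eq, not_true, if_false]
            by_cases hc1 : 1 ≤ u ∧ u ≤ nI ∧ 1 ≤ v ∧ v ≤ nI
            · by_cases hc2 : -(10 ^ 9 : Int) ≤ w ∧ w ≤ 10 ^ 9
              · rw [if_neg (show ¬¬(1 ≤ u ∧ u ≤ nI ∧ 1 ≤ v ∧ v ≤ nI) by tauto),
                  if_neg (show ¬¬(-(10 ^ 9 : Int) ≤ w ∧ w ≤ 10 ^ 9) by tauto),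
                  if_neg (show ¬¬(1 ≤ u ∧ u ≤ nI ∧ 1 ≤ v ∧ v ≤ nI ∧
                    -(10 ^ 9 : Int) ≤ w ∧ w ≤ 10 ^ 9) by tauto)]
                rw [← apply_ite (pvEdgesB lines idx nI k (j + 1))]
                exact ih (j + 1) _ _
                  (pvRel_edge nI nI.toNat rfl d s ⟨hrel.1, hrel.2.1, hrel.2.2.1, hrel.2.2.2⟩
                    u v ⟨hc1.1, hc1.2.1⟩ ⟨hc1.2.2.1, hc1.2.2.2⟩)
              · rw [if_neg (by tauto), if_pos (by tauto), if_pos (by tauto)]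
                exact Or.inl ⟨rfl, rfl⟩
            · rw [if_pos (by tauto), if_pos (by tauto)]
              exact Or.inl ⟨rfl, rfl⟩
    · rw [if_pos hlen3, if_pos hlen3]
      exact Or.inl ⟨rfl, rfl⟩

theorem pvCase_eq (lines : List String) (idx : Nat) :
    pvCaseB lines lines.length idx =
      (if (parse_one_case lines idx).1 then some (parse_one_case lines idx).2 else none) := by
  rw [pvCaseB, parse_one_case, pvInts]
  by_cases hidx : idx < lines.length
  · rw [if_pos hidx, if_neg (show ¬(idx ≥ lines.length) by omega)]
    by_cases hlen2 : (pvSplit (lines.getD idx "")).length = 2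
    · obtain ⟨s0, s1, hparts⟩ := List.length_eq_two.mp hlen2
      rw [hparts]
      simp only [List.length_cons, List.length_nil, List.getD_cons_zero, List.getD_cons_succ,
        ne_eq, not_true, if_false]
      rcases o0 : PySem.Int.ofStr? s0 with _ | n
      · simp only [pvParseAll, o0]
        rfl
      · rcases o1 : PySem.Int.ofStr? s1 with _ | m
        · simp only [pvParseAll, o0, o1]
          rfl
        · simp only [pvParseAll, o0, o1]
          by_cases h1 : 2 ≤ n ∧ n ≤ 200000
          · by_cases h2 : n - 1 ≤ m ∧ m ≤ 200000
            · by_cases h3 : (idx : Int) + m ≥ (lines.length : Int)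
              · rw [if_neg (show ¬¬(2 ≤ n ∧ n ≤ 200000) by tauto),
                  if_neg (show ¬¬(n - 1 ≤ m ∧ m ≤ 200000) by tauto), if_pos h3,
                  if_pos (Or.inr h3)]
                rfl
              · rw [if_neg (show ¬¬(2 ≤ n ∧ n ≤ 200000) by tauto),
                  if_neg (show ¬¬(n - 1 ≤ m ∧ m ≤ 200000) by tauto), if_neg h3,
                  if_neg (show ¬(¬((2 ≤ n ∧ n ≤ 200000) ∧ n - 1 ≤ m ∧ m ≤ 200000) ∨
                    (idx : Int) + m ≥ (lines.length : Int)) by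
                      rw [not_or]
                      exact ⟨by tauto, h3⟩)]
                have hrel : pvRel n.toNat (pvDsuInit n.toNat) (List.range n.toNat, n) := by
                  have := pvRel_init n.toNat
                  rwa [Int.toNat_of_nonneg (by omega)] at this
                rcases pvEdges_rel lines idx n m.toNat 1 (pvDsuInit n.toNat)
                    (List.range n.toNat, n) hrel with ⟨hA, hB⟩ | ⟨d', s', hA, hB, hrel'⟩
                · rw [hA, hB]
                  rfl
                · simp only [hA, hB]
                  by_cases hcc : d'.cc ≠ 1
                  · rw [if_pos hcc, if_pos (show s'.2 ≠ 1 by rw [← hrel'.2.2.1]; exact hcc)]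
                    rfl
                  · rw [if_neg hcc, if_neg (show ¬(s'.2 ≠ 1) by rw [← hrel'.2.2.1]; exact hcc)]
                    rw [show idx + (m.toNat + 1) = idx + 1 + m.toNat by omega]
                    rfl
            · rw [if_neg (show ¬¬(2 ≤ n ∧ n ≤ 200000) by tauto), if_pos h2,
                if_pos (Or.inl (by tauto))]
              rfl
          · rw [if_pos h1, if_pos (Or.inl (by tauto))]
            rfl
    · rw [if_pos hlen2, if_pos hlen2]
      rfl
  · rw [if_neg hidx, if_pos (show idx ≥ lines.length by omega)]
    rfl

theorem pvCases_eq (lines : List String) : ∀ t idx,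
    pvCasesB lines lines.length t idx = pvCasesA lines t idx := by
  intro t
  induction t with
  | zero => intro idx; rfl
  | succ t ih =>
    intro idx
    show (match pvCaseB lines lines.length idx with
          | none => none | some idx2 => pvCasesB lines lines.length t idx2) = _
    rw [pvCase_eq]
    show _ = (let r := parse_one_case lines idx;
              if r.1 then pvCasesA lines t r.2 else none)
    by_cases h : (parse_one_case lines idx).1 <;> simp [h, ih]

-- ===== VERDICT (by name: the statement is the Claim_ definition above) =====
theorem validate_cases_with_T_spec : Claim_equal_validate_cases_with_T := by
  intro lines _
  show validate_cases_with_T lines = validate_cases_with_T_alt lines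
  cases lines with
  | nil => rfl
  | cons l0 rest =>
    rw [validate_cases_with_T, validate_cases_with_T_alt, pvInts]
    by_cases hlen1 : (pvSplit l0).length = 1
    · obtain ⟨s0, hparts⟩ := List.length_eq_one_iff.mp hlen1
      rw [hparts]
      simp only [List.length_cons, List.length_nil, List.getD_cons_zero,
        ne_eq, not_true, if_false]
      rcases o0 : PySem.Int.ofStr? s0 with _ | T
      · simp only [pvParseAll, o0]
      · simp only [pvParseAll, o0]
        by_cases hT : T < 1
        · rw [if_pos hT, if_pos hT]
        · rw [if_neg hT, if_neg hT,
            show rest.length + 1 = (l0 :: rest).length by simp, pvCases_eq]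
    · rw [if_pos hlen1, if_pos hlen1]
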